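-- pv_equiv track=rewrite | github.com/mbdx6cw3/CSD-MD | molecular_dynamics.py | write_plumed_script
-- ===== SOURCE A (Python) =====
-- def write_plumed_script(torsions):
--
--     # each torsion will be allocated to a CV
--     torsion_CV = [None]*len(torsions)
--
--     # start CV counter
--     CV_count = 1
--
--     # first torsion will always be allocated to new CV
--     torsion_CV[0] = CV_count
--
--     # loop through all torsions to identify all CVs
--     for i_tors in range (1, len(torsions)):
--
--         # get central atom pair for this torsion
--         pair_1 = torsions[i_tors][1:-1]
--
--         # assume we will create a new CV
--         new_CV = True
--
--         # loop over other torsions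
--         for j_tors in range(i_tors):
--
--             # get central atom pair for this torsion
--             pair_2 = torsions[j_tors][1:-1]
--
--             # check to see if there are any shared atom indices in the two torsions
--             adjacent_torsions = not set(pair_1).isdisjoint(pair_2)
--
--             # if the two pairs do not share any atoms it may be a new CV
--             if adjacent_torsions:
--                 new_CV = False
--                 torsion_CV[i_tors] = torsion_CV[j_tors]
--                 break
--
--         # if no adjacent torsions were found assign this torsion to a new CV
--         if new_CV:
--             CV_count += 1
--             torsion_CV[i_tors] = CV_count
--
--     bias_pace = 500 # frequency of depositing Gaussians
--     bias_height = 1.0 # Gaussian height in kJ/mol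
--     bias_sigma = 0.35 # Gaussian width
--
--     template_text = [": TORSION ATOMS=", ": METAD ARG=", f" PACE={bias_pace}"
--                     f" HEIGHT={bias_height} SIGMA=", " FILE=./HILLS_",
--                      "PRINT STRIDE=10 ARG=", ".bias FILE=./COLVAR_"]
--
--     plumed_text = ""
--     # write all torsion angles for biasing
--     for i_tors in range(len(torsions)):
--         indices = ",".join(str(x+1) for x in torsions[i_tors])
--         text = f"phi{i_tors+1}" + template_text[0] + indices + "\n"
--         plumed_text = plumed_text + text
--     plumed_text = plumed_text + "\n"
--
--     # for each CV bias determine which torsions are in it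
--     for i_CV in range(CV_count):
--         text = f"metad{i_CV + 1}" + template_text[1]
--         torsion_list = [i for i, n in enumerate(torsion_CV) if n == (i_CV+1)]
--         for i_tors in range(len(torsion_list)):
--             text = text + f"phi{torsion_list[i_tors]+1}"
--             if i_tors != len(torsion_list)-1:
--                 text = text + ","
--         text = text + template_text[2]
--         for i_tors in range(len(torsion_list)):
--             text = text + f"{bias_sigma}"
--             if i_tors != len(torsion_list)-1:
--                 text = text + ","
--         text = text + template_text[3] + f"{i_CV+1}" + "\n"
--         plumed_text = plumed_text + text
--     plumed_text = plumed_text + "\n"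
--
--     for i_CV in range(CV_count):
--         text = template_text[4]
--         torsion_list = [i for i, n in enumerate(torsion_CV) if n == (i_CV+1)]
--         for i_tors in range(len(torsion_list)):
--             text = text + f"phi{torsion_list[i_tors]+1}" + ","
--         text = text + f"metad{i_CV+1}" + template_text[5] + f"{i_CV+1}" + "\n"
--         plumed_text = plumed_text + text
--
--     return plumed_text
-- ===== SOURCE B (Python) =====
-- def write_plumed_script(torsions):
--     # Single pass: map each central atom to (earliest torsion index whose central
--     # pair contains it, that torsion's CV); the lexicographic min of the hits
--     # is the first earlier torsion sharing a central atom.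
--     first_seen = {}
--     torsion_CV = []
--     CV_count = 0
--     for i, t in enumerate(torsions):
--         pair = t[1:-1]
--         hits = [first_seen[a] for a in pair if a in first_seen]
--         if hits:
--             cv = min(hits)[1]
--         else:
--             CV_count += 1
--             cv = CV_count
--         torsion_CV.append(cv)
--         for a in pair:
--             if a not in first_seen:
--                 first_seen[a] = (i, cv)
--
--     # one-pass grouping of torsion indices by CV
--     groups = [[] for _ in range(CV_count)]
--     for i, cv in enumerate(torsion_CV):
--         groups[cv - 1].append(i)
--
--     lines = ["phi%d: TORSION ATOMS=" % (i + 1) + ",".join(str(x + 1) for x in t)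
--              for i, t in enumerate(torsions)]
--     lines.append("")
--     lines += ["metad%d: METAD ARG=" % k + ",".join("phi%d" % (i + 1) for i in g)
--               + " PACE=500 HEIGHT=1.0 SIGMA=" + ",".join(["0.35"] * len(g))
--               + " FILE=./HILLS_%d" % k
--               for k, g in enumerate(groups, 1)]
--     lines.append("")
--     lines += ["PRINT STRIDE=10 ARG=" + "".join("phi%d," % (i + 1) for i in g)
--               + "metad%d.bias FILE=./COLVAR_%d" % (k, k)
--               for k, g in enumerate(groups, 1)]
--     return "\n".join(lines) + "\n"
-- ===== Notes on version B (the rewrite author's own statement) =====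
-- stated objective: alternative
-- what changed: Replaces A's per-torsion scan over all earlier torsions by a single pass with a dict mapping each central atom to the (index, CV) of the earliest torsion containing it, a one-pass bucket grouping of torsions by CV, and join-based string assembly instead of index loops with conditional commas.
-- crash fix: On the empty torsion list A raises IndexError (torsion_CV[0] on an empty list) while B returns the empty script '\n\n'. — e.g. on write_plumed_script([]): A raises IndexError, B returns "\n\n"
import Mathlib
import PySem

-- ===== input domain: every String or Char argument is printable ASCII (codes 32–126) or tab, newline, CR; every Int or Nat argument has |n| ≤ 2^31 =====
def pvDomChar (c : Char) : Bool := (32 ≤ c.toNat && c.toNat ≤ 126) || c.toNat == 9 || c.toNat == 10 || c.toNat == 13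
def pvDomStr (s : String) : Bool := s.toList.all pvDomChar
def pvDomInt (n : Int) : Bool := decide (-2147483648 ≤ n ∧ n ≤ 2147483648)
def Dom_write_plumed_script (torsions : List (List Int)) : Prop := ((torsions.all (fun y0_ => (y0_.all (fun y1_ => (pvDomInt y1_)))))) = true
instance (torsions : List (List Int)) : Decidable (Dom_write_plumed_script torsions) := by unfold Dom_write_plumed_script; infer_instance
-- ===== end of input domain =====

-- B assigns CVs in a single pass keeping, per central atom, the earliest torsion containing it
-- together with that torsion's CV (instead of A's scan over all earlier torsions per torsion),
-- groups torsions by CV in one pass, and assembles the script with joins; same return value on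
-- every nonempty input.

-- ===== PORT A =====

-- not set(pair_1).isdisjoint(pair_2)  (exact: isdisjoint only tests shared membership; Set order unused)
def pvAdjacent (pair1 pair2 : List Int) : Bool :=
  !(PySem.Set.isdisjoint (PySem.Set.ofList pair1) (PySem.Set.ofList pair2))

-- torsion_CV[i] = v; exact for the nonnegative in-range indices A uses
def pvSetAt (l : List (Option Int)) (i : Int) (v : Option Int) : List (Option Int) := l.set i.toNat v

def pvTemplateText : List String := [": TORSION ATOMS=", ": METAD ARG=", " PACE=500 HEIGHT=1.0 SIGMA=",
  " FILE=./HILLS_", "PRINT STRIDE=10 ARG=", ".bias FILE=./COLVAR_"]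

-- body of A's CV-identification loop; the inner 'for j_tors in range(i_tors): … break'
-- takes the first j with shared central atoms, ported as find? (exact)
def pvAStep (torsions : List (List Int)) (st : List (Option Int) × Int) (i_tors : Int) :
    List (Option Int) × Int :=
  let pair_1 := PySem.List.slice (PySem.List.pyGetD torsions i_tors []) (some 1) (some (-1))
  match (PySem.List.pyRange 0 i_tors).find? (fun j_tors =>
      pvAdjacent pair_1 (PySem.List.slice (PySem.List.pyGetD torsions j_tors []) (some 1) (some (-1)))) with
  | some j_tors => (pvSetAt st.1 i_tors (PySem.List.pyGetD st.1 j_tors none), st.2)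
  | none => (pvSetAt st.1 i_tors (some (st.2 + 1)), st.2 + 1)

-- A's CV-identification phase: torsion_CV (None-initialised, slot 0 = CV 1) and CV_count
def pvAAssign (torsions : List (List Int)) : List (Option Int) × Int :=
  (PySem.List.pyRange 1 (torsions.length : Int)).foldl (pvAStep torsions)
    (pvSetAt (List.replicate torsions.length none) 0 (some 1), 1)

def pvALine1 (torsions : List (List Int)) (i_tors : Int) : String :=
  "phi" ++ PySem.Int.toStr (i_tors + 1) ++ pvTemplateText.getD 0 "" ++
    PySem.Str.join "," ((PySem.List.pyGetD torsions i_tors []).map (fun x => PySem.Int.toStr (x + 1))) ++ "\n"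

def pvALine2 (torsion_CV : List (Option Int)) (i_CV : Int) : String :=
  let text := "metad" ++ PySem.Int.toStr (i_CV + 1) ++ pvTemplateText.getD 1 ""
  let torsion_list := ((PySem.List.enumerate torsion_CV).filter (fun p => p.2 == some (i_CV + 1))).map (·.1)
  let text := (PySem.List.pyRange 0 (torsion_list.length : Int)).foldl (fun text i_tors =>
      let text := text ++ "phi" ++ PySem.Int.toStr (PySem.List.pyGetD torsion_list i_tors 0 + 1)
      if i_tors ≠ (torsion_list.length : Int) - 1 then text ++ "," else text) text
  let text := text ++ pvTemplateText.getD 2 ""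
  let text := (PySem.List.pyRange 0 (torsion_list.length : Int)).foldl (fun text i_tors =>
      let text := text ++ "0.35"
      if i_tors ≠ (torsion_list.length : Int) - 1 then text ++ "," else text) text
  text ++ pvTemplateText.getD 3 "" ++ PySem.Int.toStr (i_CV + 1) ++ "\n"

def pvALine3 (torsion_CV : List (Option Int)) (i_CV : Int) : String :=
  let text := pvTemplateText.getD 4 ""
  let torsion_list := ((PySem.List.enumerate torsion_CV).filter (fun p => p.2 == some (i_CV + 1))).map (·.1)
  let text := (PySem.List.pyRange 0 (torsion_list.length : Int)).foldl (fun text i_tors =>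
      text ++ "phi" ++ PySem.Int.toStr (PySem.List.pyGetD torsion_list i_tors 0 + 1) ++ ",") text
  text ++ "metad" ++ PySem.Int.toStr (i_CV + 1) ++ pvTemplateText.getD 5 "" ++ PySem.Int.toStr (i_CV + 1) ++ "\n"

def write_plumed_script (torsions : List (List Int)) : String :=
  let torsion_CV := (pvAAssign torsions).1
  let CV_count := (pvAAssign torsions).2
  let plumed_text := (PySem.List.pyRange 0 (torsions.length : Int)).foldl
      (fun acc i_tors => acc ++ pvALine1 torsions i_tors) ""
  let plumed_text := plumed_text ++ "\n"
  let plumed_text := (PySem.List.pyRange 0 CV_count).foldl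
      (fun acc i_CV => acc ++ pvALine2 torsion_CV i_CV) plumed_text
  let plumed_text := plumed_text ++ "\n"
  (PySem.List.pyRange 0 CV_count).foldl
      (fun acc i_CV => acc ++ pvALine3 torsion_CV i_CV) plumed_text

-- ===== PORT B =====

-- body of B's single pass: hits = first-seen (index, CV) pairs of the central atoms;
-- min(hits) is Python's lexicographic min of tuples
def pvAltStep (st : PySem.Dict Int (Int × Int) × List Int × Int) (p : Int × List Int) :
    PySem.Dict Int (Int × Int) × List Int × Int :=
  let pair := PySem.List.slice p.2 (some 1) (some (-1))
  let hits := pair.filterMap (fun a => st.1.get? a)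
  let cvcnt : Int × Int :=
    match PySem.List.min2? hits (·.1) (·.2) with
    | some m => (m.2, st.2.2)
    | none => (st.2.2 + 1, st.2.2 + 1)
  let first_seen := pair.foldl (fun d a => if d.contains a then d else d.insert a (p.1, cvcnt.1)) st.1
  (first_seen, st.2.1 ++ [cvcnt.1], cvcnt.2)

def pvBAssign (torsions : List (List Int)) : PySem.Dict Int (Int × Int) × List Int × Int :=
  (PySem.List.enumerate torsions).foldl pvAltStep (PySem.Dict.empty, [], 0)

-- groups[cv-1].append(i): cv - 1 is nonnegative and in range for every cv this pass stores (exact there)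
def pvBGroups (torsion_CV : List Int) (CV_count : Int) : List (List Int) :=
  (PySem.List.enumerate torsion_CV).foldl (fun gs q => gs.modify (q.2 - 1).toNat (· ++ [q.1]))
    ((PySem.List.pyRange 0 CV_count).map (fun _ => []))

def pvBLine1 (p : Int × List Int) : String :=
  "phi" ++ PySem.Int.toStr (p.1 + 1) ++ ": TORSION ATOMS=" ++
    PySem.Str.join "," (p.2.map (fun x => PySem.Int.toStr (x + 1)))

def pvBLine2 (q : Int × List Int) : String :=
  "metad" ++ PySem.Int.toStr q.1 ++ ": METAD ARG=" ++
    PySem.Str.join "," (q.2.map (fun i => "phi" ++ PySem.Int.toStr (i + 1))) ++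
    " PACE=500 HEIGHT=1.0 SIGMA=" ++ PySem.Str.join "," (List.replicate q.2.length "0.35") ++
    " FILE=./HILLS_" ++ PySem.Int.toStr q.1

def pvBLine3 (q : Int × List Int) : String :=
  "PRINT STRIDE=10 ARG=" ++ PySem.Str.join "" (q.2.map (fun i => "phi" ++ PySem.Int.toStr (i + 1) ++ ",")) ++
    "metad" ++ PySem.Int.toStr q.1 ++ ".bias FILE=./COLVAR_" ++ PySem.Int.toStr q.1

def write_plumed_script_alt (torsions : List (List Int)) : String :=
  let torsion_CV := (pvBAssign torsions).2.1
  let CV_count := (pvBAssign torsions).2.2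
  let groups := pvBGroups torsion_CV CV_count
  let lines := (PySem.List.enumerate torsions).map pvBLine1
  let lines := lines ++ [""]
  let lines := lines ++ (PySem.List.enumerate groups 1).map pvBLine2
  let lines := lines ++ [""]
  let lines := lines ++ (PySem.List.enumerate groups 1).map pvBLine3
  PySem.Str.join "\n" lines ++ "\n"

-- ===== PRECONDITION & SPEC =====
-- Pre_ excludes only the empty list, on which A raises IndexError (torsion_CV[0] on an empty list).
def Pre_write_plumed_script (torsions : List (List Int)) : Prop := torsions ≠ []
instance (torsions : List (List Int)) : Decidable (Pre_write_plumed_script torsions) := by unfold Pre_write_plumed_script; infer_instance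
def pvWitness_write_plumed_script : List (List Int) := [[0, 1, 2, 3], [1, 2, 3, 4]]

-- On the empty torsion list A raises IndexError while B returns the empty script "\n\n".
def Raises_write_plumed_script (torsions : List (List Int)) : Prop := torsions = []
instance (torsions : List (List Int)) : Decidable (Raises_write_plumed_script torsions) := by unfold Raises_write_plumed_script; infer_instance
def pvRaiseWitness_write_plumed_script : List (List Int) := []
def pvRaiseWitnessOut_write_plumed_script : String := "\n\n"

def Spec_write_plumed_script (torsions : List (List Int)) (out : String) : Prop := out = write_plumed_script_alt torsions
instance (torsions : List (List Int)) (out : String) : Decidable (Spec_write_plumed_script torsions out) := by unfold Spec_write_plumed_script; infer_instance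

-- ===== CLAIM (what is proved, stated in full; the proofs are below) =====
def Claim_equal_write_plumed_script : Prop := ∀ (torsions : List (List Int)), Dom_write_plumed_script torsions → Pre_write_plumed_script torsions → Spec_write_plumed_script torsions (write_plumed_script torsions)
def Claim_raises_write_plumed_script : Prop := (∀ (torsions : List (List Int)), Dom_write_plumed_script torsions → Raises_write_plumed_script torsions → ¬ Pre_write_plumed_script torsions) ∧ (Dom_write_plumed_script (pvRaiseWitness_write_plumed_script) ∧ Raises_write_plumed_script (pvRaiseWitness_write_plumed_script) ∧ write_plumed_script_alt (pvRaiseWitness_write_plumed_script) = pvRaiseWitnessOut_write_plumed_script)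

-- ===== LEMMAS AND PROOFS =====

def pvMid (t : List Int) : List Int := PySem.List.slice t (some 1) (some (-1))
def pvStep (st : List (List Int × Int) × Int) (t : List Int) : List (List Int × Int) × Int :=
  match st.1.find? (fun q => pvAdjacent (pvMid t) q.1) with
  | some q => (st.1 ++ [(pvMid t, q.2)], st.2)
  | none => (st.1 ++ [(pvMid t, st.2 + 1)], st.2 + 1)
def pvAssign (ts : List (List Int)) : List (List Int × Int) × Int := ts.foldl pvStep ([], 0)
def pvCvs (ts : List (List Int)) : List Int := (pvAssign ts).1.map (·.2)
def pvGrp (cvs : List Int) (k : Int) : List Int :=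
  ((PySem.List.enumerate cvs).filter (fun q => q.2 == k)).map (·.1)
theorem pvAssign_append (ts : List (List Int)) (t : List Int) :
    pvAssign (ts ++ [t]) = pvStep (pvAssign ts) t := by
  simp [pvAssign, List.foldl_append]
theorem pvAssign_shape (ts : List (List Int)) :
    (pvAssign ts).1.map (·.1) = ts.map pvMid := by
  induction ts using List.reverseRecOn with
  | nil => simp [pvAssign]
  | append_singleton ts t ih =>
    cases h : (pvAssign ts).1.find? (fun q => pvAdjacent (pvMid t) q.1) with
    | none => rw [pvAssign_append, pvStep, h]; dsimp only; simp [ih]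
    | some q0 => rw [pvAssign_append, pvStep, h]; dsimp only; simp [ih]
theorem pvAssign_length (ts : List (List Int)) : (pvAssign ts).1.length = ts.length := by
  have := congrArg List.length (pvAssign_shape ts); simpa using this
theorem find?_range_getD {β : Type} (l : List β) (P : β → Bool) (d : β) :
    ((List.range l.length).find? (fun j => P (l.getD j d))).map (fun j => l.getD j d) = l.find? P := by
  induction l with
  | nil => simp
  | cons x l ih =>
    have hrec : (List.range (x :: l).length).find? (fun j => P ((x :: l).getD j d))
        = if P x then some 0 else ((List.range l.length).find? (fun j => P (l.getD j d))).map Nat.succ := by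
      rw [List.length_cons, List.range_succ_eq_map, List.find?_cons]
      by_cases hx : P x
      · simp [hx]
      · simp [hx, List.find?_map, Function.comp_def]
    rw [hrec]
    by_cases hx : P x
    · simp [hx]
    · rw [if_neg hx, List.find?_cons_of_neg (h := hx), ← ih, Option.map_map]
      cases hf : (List.range l.length).find? (fun j => P (l.getD j d)) <;> simp [Function.comp_def]
theorem pvGetD_map_lt {α β : Type} (l : List α) (f : α → β) (j : Nat) (h : j < l.length)
    (d : β) (d' : α) : (l.map f).getD j d = f (l.getD j d') := by
  rw [List.getD_eq_getElem _ _ (by simpa using h), List.getD_eq_getElem _ _ h]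
  simp
theorem pvFind?_congr {α : Type} (l : List α) (p q : α → Bool) (h : ∀ a ∈ l, p a = q a) :
    l.find? p = l.find? q := by
  induction l with
  | nil => rfl
  | cons x l ih =>
    rw [List.find?_cons, List.find?_cons, h x (by simp)]
    cases q x <;> simp [ih (fun a ha => h a (by simp [ha]))]
theorem pvSetAt_mid (cvs : List (Option Int)) (m : Nat) (v : Option Int) (hm : 0 < m) :
    pvSetAt (cvs ++ List.replicate m none) ((cvs.length : Nat) : Int) v
      = cvs ++ [v] ++ List.replicate (m - 1) none := by
  rw [pvSetAt, Int.toNat_natCast, List.set_append, if_neg (by omega), Nat.sub_self]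
  cases m with
  | zero => omega
  | succ m => simp [List.replicate_succ, List.set_cons_zero]

-- A's CV loop state after processing torsions 1..k equals the reference assignment of the prefix
theorem pvAAssign_prefix (ts : List (List Int)) : ∀ k : Nat, k < ts.length →
    (PySem.List.pyRange 1 ((k + 1 : Nat) : Int)).foldl (pvAStep ts)
      (pvSetAt (List.replicate ts.length none) 0 (some 1), 1)
    = ((pvCvs (ts.take (k + 1))).map some ++ List.replicate (ts.length - (k + 1)) none,
        (pvAssign (ts.take (k + 1))).2) := by
  intro k
  induction k with
  | zero =>
    intro hk
    have h1 : PySem.List.pyRange 1 ((1 : Nat) : Int) = [] := by decide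
    rw [h1, List.foldl_nil]
    cases ts with
    | nil => simp at hk
    | cons t rest =>
      have hassign : pvAssign [t] = ([(pvMid t, 1)], 1) := by
        simp [pvAssign, pvStep]
      simp [pvSetAt, pvCvs, hassign, List.replicate_succ, List.set_cons_zero]
  | succ k ih =>
    intro hk
    have hk2 : k < ts.length := by omega
    have hcast : ((k + 2 : Nat) : Int) = ((k + 1 : Nat) : Int) + 1 := by push_cast; ring
    rw [show ((k + 1 + 1 : Nat) : Int) = ((k + 2 : Nat) : Int) from by push_cast; ring, hcast,
      PySem.List.pyRange_one_succ_right (by push_cast; omega), List.foldl_append, ih hk2]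
    -- one more step of A's loop, at torsion index k+1
    have hlt : k + 1 < ts.length := hk
    have hgetD : ts.getD (k + 1) [] = ts[k + 1] := List.getD_eq_getElem ts [] hlt
    have htake : ts.take (k + 2) = ts.take (k + 1) ++ [ts[k + 1]] := by
      rw [show k + 2 = (k + 1) + 1 from rfl, List.take_add_one, List.getElem?_eq_getElem hlt]
      rfl
    have hcvslen : (pvCvs (ts.take (k + 1))).length = k + 1 := by
      rw [pvCvs, List.length_map, pvAssign_length, List.length_take]; omega
    have hlen_l : (pvAssign (ts.take (k + 1))).1.length = k + 1 := by
      rw [pvAssign_length, List.length_take]; omega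
    have hpred : ∀ jn ∈ List.range (k + 1),
        pvAdjacent (PySem.List.slice (PySem.List.pyGetD ts ((k + 1 : Nat) : Int) []) (some 1) (some (-1)))
          (PySem.List.slice (PySem.List.pyGetD ts ((jn : Nat) : Int) []) (some 1) (some (-1)))
        = pvAdjacent (pvMid (ts.getD (k + 1) []))
            (((pvAssign (ts.take (k + 1))).1.getD jn ([], 0)).1) := by
      intro jn hjn
      have hjn2 : jn < k + 1 := List.mem_range.1 hjn
      have h1 : ((pvAssign (ts.take (k + 1))).1.getD jn ([], 0)).1
          = pvMid ((ts.take (k + 1)).getD jn []) := by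
        have h2 := pvGetD_map_lt (pvAssign (ts.take (k + 1))).1 (fun q => q.1) jn
          (by rw [hlen_l]; exact hjn2) [] ([], 0)
        rw [pvAssign_shape] at h2
        rw [← h2, pvGetD_map_lt _ _ _ (by rw [List.length_take]; omega) [] []]
      have h3 : (ts.take (k + 1)).getD jn [] = ts.getD jn [] := by
        rw [List.getD_eq_getElem?_getD, List.getElem?_take_of_lt hjn2, ← List.getD_eq_getElem?_getD]
      rw [h1, h3, PySem.List.pyGetD_natCast, PySem.List.pyGetD_natCast]
      rfl
    have hfind : (PySem.List.pyRange 0 ((k + 1 : Nat) : Int)).find? (fun j_tors =>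
          pvAdjacent (PySem.List.slice (PySem.List.pyGetD ts ((k + 1 : Nat) : Int) []) (some 1) (some (-1)))
            (PySem.List.slice (PySem.List.pyGetD ts j_tors []) (some 1) (some (-1))))
        = ((List.range (k + 1)).find? (fun jn =>
            pvAdjacent (pvMid (ts.getD (k + 1) []))
              (((pvAssign (ts.take (k + 1))).1.getD jn ([], 0)).1))).map (fun jn => ((jn : Nat) : Int)) := by
      rw [PySem.List.pyRange_zero_natCast, List.find?_map]
      simp only [Function.comp_def]
      exact congrArg (Option.map (fun jn : Nat => ((jn : Nat) : Int)))
        (pvFind?_congr _ _ _ hpred)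
    have hmain := find?_range_getD (pvAssign (ts.take (k + 1))).1
      (fun q => pvAdjacent (pvMid (ts.getD (k + 1) [])) q.1) ([], 0)
    rw [hlen_l] at hmain
    rw [List.foldl_cons, List.foldl_nil, show k + 1 + 1 = k + 2 from rfl, pvAStep.eq_def]
    dsimp only
    cases hf : (List.range (k + 1)).find? (fun jn =>
        pvAdjacent (pvMid (ts.getD (k + 1) []))
          (((pvAssign (ts.take (k + 1))).1.getD jn ([], 0)).1)) with
    | none =>
      rw [hfind, hf]
      dsimp only [Option.map_none]
      rw [hf] at hmain
      simp only [Option.map_none] at hmain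
      have hfl : (pvAssign (ts.take (k + 1))).1.find? (fun q => pvAdjacent (pvMid ts[k + 1]) q.1) = none := by
        rw [← hgetD, ← hmain]
      have hstep : pvAssign (ts.take (k + 2)) = ((pvAssign (ts.take (k + 1))).1
          ++ [(pvMid ts[k + 1], (pvAssign (ts.take (k + 1))).2 + 1)], (pvAssign (ts.take (k + 1))).2 + 1) := by
        rw [htake, pvAssign_append, pvStep, hfl]
      have hcvs2 : pvCvs (ts.take (k + 2)) = pvCvs (ts.take (k + 1)) ++ [(pvAssign (ts.take (k + 1))).2 + 1] := by
        rw [pvCvs, hstep]; simp [pvCvs]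
      have hset := pvSetAt_mid ((pvCvs (ts.take (k + 1))).map some) (ts.length - (k + 1))
        (some ((pvAssign (ts.take (k + 1))).2 + 1)) (by omega)
      rw [List.length_map, hcvslen] at hset
      rw [show (ts.length - (k + 1) - 1) = ts.length - (k + 2) from by omega] at hset
      rw [hset, hcvs2, hstep]
      simp
    | some jn =>
      have hjn_lt : jn < k + 1 := List.mem_range.1 (List.mem_of_find?_eq_some hf)
      rw [hf] at hmain
      simp only [Option.map_some] at hmain
      have hfl : (pvAssign (ts.take (k + 1))).1.find? (fun q => pvAdjacent (pvMid ts[k + 1]) q.1)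
          = some ((pvAssign (ts.take (k + 1))).1.getD jn ([], 0)) := by
        rw [← hgetD, ← hmain]
      have hstep : pvAssign (ts.take (k + 2)) = ((pvAssign (ts.take (k + 1))).1
          ++ [(pvMid ts[k + 1], ((pvAssign (ts.take (k + 1))).1.getD jn ([], 0)).2)],
          (pvAssign (ts.take (k + 1))).2) := by
        rw [htake, pvAssign_append, pvStep, hfl]
      have hcvs2 : pvCvs (ts.take (k + 2)) = pvCvs (ts.take (k + 1))
          ++ [((pvAssign (ts.take (k + 1))).1.getD jn ([], 0)).2] := by
        rw [pvCvs, hstep]; simp [pvCvs]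
      rw [hfind, hf]
      dsimp only [Option.map_some]
      have hread : PySem.List.pyGetD ((pvCvs (ts.take (k + 1))).map some
            ++ List.replicate (ts.length - (k + 1)) none) ((jn : Nat) : Int) none
          = some (((pvAssign (ts.take (k + 1))).1.getD jn ([], 0)).2) := by
        rw [PySem.List.pyGetD_natCast,
          List.getD_append _ _ _ _ (by rw [List.length_map, hcvslen]; omega),
          pvGetD_map_lt _ _ _ (by rw [hcvslen]; omega) none 0]
        congr 1
        rw [pvCvs, pvGetD_map_lt _ _ _ (by rw [hlen_l]; omega) 0 ([], 0)]
      have hset := pvSetAt_mid ((pvCvs (ts.take (k + 1))).map some) (ts.length - (k + 1))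
        (some (((pvAssign (ts.take (k + 1))).1.getD jn ([], 0)).2)) (by omega)
      rw [List.length_map, hcvslen] at hset
      rw [show (ts.length - (k + 1) - 1) = ts.length - (k + 2) from by omega] at hset
      rw [hread, hset, hcvs2, hstep]
      simp

theorem pvAAssign_eq (ts : List (List Int)) (h : ts ≠ []) :
    pvAAssign ts = ((pvCvs ts).map some, (pvAssign ts).2) := by
  have hpos : 0 < ts.length := List.length_pos_iff.2 h
  have hmain := pvAAssign_prefix ts (ts.length - 1) (by omega)
  rw [show ts.length - 1 + 1 = ts.length from by omega, List.take_length, Nat.sub_self] at hmain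
  simpa [pvAAssign] using hmain

theorem pvAssign_bounds (ts : List (List Int)) :
    0 ≤ (pvAssign ts).2 ∧ ∀ q ∈ (pvAssign ts).1, 1 ≤ q.2 ∧ q.2 ≤ (pvAssign ts).2 := by
  induction ts using List.reverseRecOn with
  | nil => simp [pvAssign]
  | append_singleton ts t ih =>
    cases h : (pvAssign ts).1.find? (fun q => pvAdjacent (pvMid t) q.1) with
    | none =>
      rw [pvAssign_append, pvStep, h]
      dsimp only
      refine ⟨by omega, ?_⟩
      intro q hq
      rcases List.mem_append.1 hq with hq | hq
      · have := ih.2 q hq; omega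
      · have h0 := ih.1
        simp at hq; subst hq; dsimp only; omega
    | some q0 =>
      rw [pvAssign_append, pvStep, h]
      dsimp only
      have hq0 := ih.2 q0 (List.mem_of_find?_eq_some h)
      refine ⟨ih.1, ?_⟩
      intro q hq
      rcases List.mem_append.1 hq with hq | hq
      · exact ih.2 q hq
      · simp at hq; subst hq; simpa using hq0

theorem pvAdjacent_iff (p q : List Int) : pvAdjacent p q = true ↔ ∃ a, a ∈ p ∧ a ∈ q := by
  simp [pvAdjacent, PySem.Set.isdisjoint_iff, PySem.Set.mem_ofList,
    ← Bool.not_eq_true]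


-- min2? on (index, CV) pairs, as Python's min on tuples (no library lemmas exist for min2?)
def pvMinStep (acc : Option (Int × Int)) (x : Int × Int) : Option (Int × Int) :=
  match acc with
  | none => some x
  | some m => if (decide (x.1 < m.1) || !decide (m.1 < x.1) && decide (x.2 < m.2)) = true then some x else some m

theorem pvMin2_eq_foldl (xs : List (Int × Int)) :
    PySem.List.min2? xs (·.1) (·.2) = xs.foldl pvMinStep none := by
  unfold PySem.List.min2?
  congr 1
  funext acc x
  cases acc <;> rfl

theorem pvMinStep_some (a x : Int × Int) :
    pvMinStep (some a) x = if (decide (x.1 < a.1) || !decide (a.1 < x.1) && decide (x.2 < a.2)) = true then some x else some a := rfl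

theorem pvMin2_foldl_isSome (xs : List (Int × Int)) :
    ∀ acc : Option (Int × Int), acc.isSome → (xs.foldl pvMinStep acc).isSome := by
  induction xs with
  | nil => intro acc h; exact h
  | cons x xs ih =>
    intro acc h
    rw [List.foldl_cons]
    apply ih
    cases acc with
    | none => simp at h
    | some a => rw [pvMinStep_some]; split_ifs <;> rfl

theorem pvMin2_isSome (xs : List (Int × Int)) (h : xs ≠ []) :
    (PySem.List.min2? xs (·.1) (·.2)).isSome := by
  cases xs with
  | nil => exact absurd rfl h
  | cons x xs =>
    rw [pvMin2_eq_foldl, List.foldl_cons]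
    exact pvMin2_foldl_isSome xs (pvMinStep none x) rfl

theorem pvMin2_foldl_spec (xs : List (Int × Int)) : ∀ (a m : Int × Int),
    xs.foldl pvMinStep (some a) = some m →
    (m = a ∨ m ∈ xs) ∧ m.1 ≤ a.1 ∧ ∀ y ∈ xs, m.1 ≤ y.1 := by
  induction xs with
  | nil => intro a m h; simp at h; simp [h]
  | cons x xs ih =>
    intro a m h
    rw [List.foldl_cons, pvMinStep_some] at h
    by_cases hc : (decide (x.1 < a.1) || !decide (a.1 < x.1) && decide (x.2 < a.2)) = true
    · rw [if_pos hc] at h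
      obtain ⟨h1, h2, h3⟩ := ih x m h
      have hxa : x.1 ≤ a.1 := by
        simp only [Bool.or_eq_true, Bool.and_eq_true, decide_eq_true_eq, Bool.not_eq_true',
          decide_eq_false_iff_not] at hc
        rcases hc with hc | ⟨hc, _⟩ <;> omega
      refine ⟨?_, by omega, ?_⟩
      · rcases h1 with h1 | h1 <;> simp [h1]
      · intro y hy
        rcases List.mem_cons.1 hy with rfl | hy
        · omega
        · exact h3 y hy
    · rw [if_neg hc] at h
      obtain ⟨h1, h2, h3⟩ := ih a m h
      have hax : a.1 ≤ x.1 := by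
        by_contra hlt
        exact hc (by simp only [Bool.or_eq_true, decide_eq_true_eq]; left; omega)
      refine ⟨?_, h2, ?_⟩
      · rcases h1 with h1 | h1 <;> simp [h1]
      · intro y hy
        rcases List.mem_cons.1 hy with rfl | hy
        · omega
        · exact h3 y hy

theorem pvMin2_spec (xs : List (Int × Int)) (m : Int × Int)
    (h : PySem.List.min2? xs (·.1) (·.2) = some m) :
    m ∈ xs ∧ ∀ y ∈ xs, m.1 ≤ y.1 := by
  cases xs with
  | nil => rw [pvMin2_eq_foldl] at h; simp at h
  | cons x xs =>
    rw [pvMin2_eq_foldl, List.foldl_cons] at h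
    obtain ⟨h1, h2, h3⟩ := pvMin2_foldl_spec xs x m h
    refine ⟨?_, ?_⟩
    · rcases h1 with h1 | h1 <;> simp [h1]
    · intro y hy
      rcases List.mem_cons.1 hy with rfl | hy
      · exact h2
      · exact h3 y hy

-- guarded insert loop of B
theorem pvGet?_guard_insert (pair : List Int) (i cv : Int) (a : Int) :
    ∀ d : PySem.Dict Int (Int × Int),
    (pair.foldl (fun d x => if d.contains x then d else d.insert x (i, cv)) d).get? a
    = if d.contains a then d.get? a else if a ∈ pair then some (i, cv) else d.get? a := by
  induction pair with
  | nil => intro d; simp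
  | cons x rest ih =>
    intro d
    simp only [List.foldl_cons]
    by_cases hcx : d.contains x
    · rw [if_pos hcx, ih]
      by_cases hca : d.contains a
      · simp [hca]
      · by_cases hax : a = x
        · subst hax; exact absurd hcx (by simp [hca])
        · simp [hca, List.mem_cons, hax]
    · rw [if_neg hcx, ih]
      by_cases hax : a = x
      · subst hax
        rw [if_pos (by simp)]
        simp [hcx, PySem.Dict.get?_insert_self]
      · rw [PySem.Dict.get?_insert_of_ne _ _ hax]
        have hceq : (d.insert x (i, cv)).contains a = d.contains a := by
          simp [PySem.Dict.contains_insert, hax]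
        rw [hceq]
        simp [List.mem_cons, hax]

-- string-building loops, on the List Char side
theorem pvToList_foldl_append {α : Type} (l : List α) (g : α → String) :
    ∀ acc : String, (l.foldl (fun a x => a ++ g x) acc).toList
      = acc.toList ++ (l.map (fun x => (g x).toList)).flatten := by
  induction l with
  | nil => intro acc; simp
  | cons x l ih => intro acc; simp [ih, String.toList_append]

theorem pvJoin_nil_eq_flatten (ls : List (List Char)) : PySem.Chars.join [] ls = ls.flatten := by
  induction ls with
  | nil => simp [PySem.Chars.join_nil]
  | cons x ls ih =>
    cases ls with
    | nil => simp [PySem.Chars.join_singleton]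
    | cons y ls => simp only [PySem.Chars.join_cons_cons] at *; simp [ih]

theorem pvJoin_sep_flatten (sep : List Char) (ls : List (List Char)) (h : ls ≠ []) :
    PySem.Chars.join sep ls ++ sep = (ls.map (· ++ sep)).flatten := by
  induction ls with
  | nil => exact absurd rfl h
  | cons x ls ih =>
    cases ls with
    | nil => simp [PySem.Chars.join_singleton]
    | cons y ls =>
      rw [PySem.Chars.join_cons_cons, List.map_cons, List.flatten_cons, ← ih (by simp)]
      simp [List.append_assoc]

-- A's conditional-comma loop writes exactly sep.join(parts)
theorem pvJoinComma (sep : List Char) (ss : List (List Char)) :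
    ((List.range ss.length).map
        (fun j => ss.getD j [] ++ if (j : Int) ≠ (ss.length : Int) - 1 then sep else [])).flatten
      = PySem.Chars.join sep ss := by
  induction ss with
  | nil => simp [PySem.Chars.join_nil]
  | cons x ss ih =>
    rw [List.length_cons, List.range_succ_eq_map, List.map_cons, List.map_map]
    push_cast
    have hmap : ((List.range ss.length).map
        ((fun j => (x :: ss).getD j [] ++ if (j : Int) ≠ ((ss.length : Int) + 1) - 1 then sep else []) ∘ Nat.succ))
        = (List.range ss.length).map
        (fun j => ss.getD j [] ++ if (j : Int) ≠ (ss.length : Int) - 1 then sep else []) := by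
      apply List.map_congr_left
      intro j hj
      simp only [Function.comp_def, List.getD_cons_succ]
      congr 1
      have : ((Nat.succ j : Nat) : Int) ≠ (ss.length : Int) + 1 - 1 ↔ (j : Int) ≠ (ss.length : Int) - 1 := by
        constructor <;> intro hne he <;> apply hne <;> omega
      split_ifs with h1 h2 h2 <;> first | rfl | (exact absurd (this.1 h1) h2) | (exact absurd (this.2 h2) h1)
    rw [hmap, List.flatten_cons, ih]
    cases ss with
    | nil => simp [PySem.Chars.join_singleton]
    | cons y ls =>
      rw [PySem.Chars.join_cons_cons]
      have hc : (0 : Int) ≠ (((y :: ls).length : Nat) : Int) + 1 - 1 := by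
        have hl : ((y :: ls).length : Int) = (ls.length : Int) + 1 := by
          rw [List.length_cons]; push_cast; ring
        omega
      rw [List.getD_cons_zero, if_pos hc]

theorem pvEnumerate_map {α β : Type} (f : α → β) (l : List α) :
    ∀ s : Int, PySem.List.enumerate (l.map f) s
      = (PySem.List.enumerate l s).map (fun q => (q.1, f q.2)) := by
  induction l with
  | nil => intro s; rfl
  | cons x l ih => intro s; simp [PySem.List.enumerate_cons, ih]

theorem pvLength_pyRange_zero (m : Nat) : (PySem.List.pyRange 0 (m : Int)).length = m := by
  rw [PySem.List.pyRange_zero_natCast]; simp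

theorem pvEnumerate_pyRange (m : Nat) : ∀ s : Int,
    PySem.List.enumerate (PySem.List.pyRange 0 (m : Int)) s
      = (PySem.List.pyRange 0 (m : Int)).map (fun k => (s + k, k)) := by
  induction m with
  | zero => intro s; rfl
  | succ m ih =>
    intro s
    have hcast : ((m + 1 : Nat) : Int) = (m : Int) + 1 := by push_cast; ring
    rw [hcast, PySem.List.pyRange_one_succ_right (by positivity), PySem.List.enumerate_append,
      ih s, List.map_append, pvLength_pyRange_zero]
    simp [PySem.List.enumerate_cons]

theorem pvGroups_fold_length (l : List (Int × Int)) : ∀ gs : List (List Int),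
    (l.foldl (fun gs q => gs.modify (q.2 - 1).toNat (· ++ [q.1])) gs).length = gs.length := by
  induction l with
  | nil => intro gs; rfl
  | cons q l ih => intro gs; rw [List.foldl_cons, ih, List.length_modify]

theorem pvGroups_fold (l : List (Int × Int)) : ∀ (gs : List (List Int)),
    (∀ q ∈ l, 1 ≤ q.2 ∧ q.2 ≤ (gs.length : Int)) → ∀ k, (hk : k < gs.length) →
    (l.foldl (fun gs q => gs.modify (q.2 - 1).toNat (· ++ [q.1])) gs)[k]?
      = some (gs[k] ++ (l.filter (fun q => q.2 == (k : Int) + 1)).map (·.1)) := by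
  induction l with
  | nil => intro gs _ k hk; simp [List.getElem?_eq_getElem hk]
  | cons q l ih =>
    intro gs hb k hk
    rw [List.foldl_cons]
    have hq := hb q (by simp)
    have hlen : (gs.modify (q.2 - 1).toNat (· ++ [q.1])).length = gs.length := List.length_modify ..
    have hb' : ∀ p ∈ l, 1 ≤ p.2 ∧ p.2 ≤ ((gs.modify (q.2 - 1).toNat (· ++ [q.1])).length : Int) := by
      intro p hp; rw [hlen]; exact hb p (by simp [hp])
    rw [ih _ hb' k (by rw [hlen]; exact hk)]
    by_cases hqk : q.2 = (k : Int) + 1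
    · have hidx : (q.2 - 1).toNat = k := by omega
      have h3 : (gs.modify (q.2 - 1).toNat (· ++ [q.1]))[k]'(by rw [List.length_modify]; exact hk) = gs[k] ++ [q.1] := by
        rw [List.getElem_modify, if_pos hidx]
      rw [h3, List.filter_cons_of_pos (by simp [hqk])]
      simp
    · have hidx : (q.2 - 1).toNat ≠ k := by omega
      have h3 : (gs.modify (q.2 - 1).toNat (· ++ [q.1]))[k]'(by rw [List.length_modify]; exact hk) = gs[k] := by
        rw [List.getElem_modify, if_neg hidx]
      rw [h3, List.filter_cons_of_neg (by simp [hqk])]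


-- B's dict maps each atom to the (index, CV) of the first torsion whose central pair contains it
def pvInvD (ts : List (List Int)) (d : PySem.Dict Int (Int × Int)) : Prop :=
  ∀ a : Int, d.get? a
    = ((PySem.List.enumerate (pvAssign ts).1).find? (fun q => q.2.1.contains a)).map
        (fun q => (q.1, q.2.2))

theorem pvInvD_none (ts : List (List Int)) (d : PySem.Dict Int (Int × Int)) (hInv : pvInvD ts d)
    (a : Int) : d.get? a = none ↔ ∀ m : Nat, (hm : m < (pvAssign ts).1.length) →
      a ∉ ((pvAssign ts).1[m]).1 := by
  rw [hInv a, Option.map_eq_none_iff, List.find?_eq_none]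
  constructor
  · intro h m hm hmem
    have hq : ((0 : Int) + (m : Int), (pvAssign ts).1[m]) ∈ PySem.List.enumerate (pvAssign ts).1 := by
      rw [PySem.List.mem_enumerate_iff]
      exact ⟨m, hm, rfl⟩
    exact (h _ hq) (List.contains_iff_mem.2 hmem)
  · intro h q hq
    obtain ⟨k, hk, rfl⟩ := (PySem.List.mem_enumerate_iff _ _ _).1 hq
    simpa using fun hc => h k hk (List.contains_iff_mem.1 hc)

theorem pvInvD_some (ts : List (List Int)) (d : PySem.Dict Int (Int × Int)) (hInv : pvInvD ts d)
    (a : Int) (v : Int × Int) (h : d.get? a = some v) :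
    ∃ m : Nat, ∃ hm : m < (pvAssign ts).1.length,
      v = ((m : Int), ((pvAssign ts).1[m]).2) ∧ a ∈ ((pvAssign ts).1[m]).1 ∧
      ∀ m' : Nat, m' < m → (hm' : m' < (pvAssign ts).1.length) → a ∉ ((pvAssign ts).1[m']).1 := by
  rw [hInv a, Option.map_eq_some_iff] at h
  obtain ⟨q, hq, hv⟩ := h
  rw [List.find?_eq_some_iff_getElem] at hq
  obtain ⟨hp, m, hm, hqm, hmin⟩ := hq
  have hm' : m < (pvAssign ts).1.length := by simpa using hm
  refine ⟨m, hm', ?_, ?_, ?_⟩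
  · rw [← hv, ← hqm, PySem.List.getElem_enumerate _ _ _ hm]
    simp
  · have := hp
    rw [← hqm, PySem.List.getElem_enumerate _ _ _ hm] at this
    exact List.contains_iff_mem.1 this
  · intro m2 hm2 hm2'
    have := hmin m2 (by omega)
    rw [PySem.List.getElem_enumerate _ _ _ (by simpa using (by omega : m2 < (pvAssign ts).1.length))] at this
    simpa [List.contains_iff_mem] using this


theorem pvInvD_extend (ts : List (List Int)) (t : List Int) (cv : Int)
    (d : PySem.Dict Int (Int × Int)) (hInv : pvInvD ts d)
    (hpairs : (pvAssign (ts ++ [t])).1 = (pvAssign ts).1 ++ [(pvMid t, cv)]) :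
    pvInvD (ts ++ [t])
      ((pvMid t).foldl (fun d a => if d.contains a then d else d.insert a ((ts.length : Int), cv)) d) := by
  intro a
  rw [pvGet?_guard_insert, hpairs, PySem.List.enumerate_append, pvAssign_length]
  have hsing : PySem.List.enumerate [(pvMid t, cv)] (0 + (ts.length : Int))
      = [((ts.length : Int), (pvMid t, cv))] := by
    simp [PySem.List.enumerate_cons]
  rw [hsing, List.find?_append]
  by_cases hca : d.contains a
  · rw [if_pos hca]
    have hv0 : (d.get? a).isSome := by
      rw [← PySem.Dict.contains_eq_isSome_get?]; exact hca
    obtain ⟨v, hv⟩ := Option.isSome_iff_exists.1 hv0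
    have hfind : (PySem.List.enumerate (pvAssign ts).1).find? (fun q => q.2.1.contains a) ≠ none := by
      intro hn
      rw [hInv a, hn] at hv
      simp at hv
    obtain ⟨q, hq⟩ := Option.ne_none_iff_exists'.1 hfind
    rw [hInv a, hq] at hv ⊢
    simp [hv]
  · rw [if_neg hca]
    have hnone : d.get? a = none := by
      rw [PySem.Dict.contains_eq_isSome_get?] at hca
      simpa using hca
    have hfn : (PySem.List.enumerate (pvAssign ts).1).find? (fun q => q.2.1.contains a) = none := by
      have := hInv a
      rw [hnone] at this
      exact Option.map_eq_none_iff.1 this.symm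
    rw [hfn, Option.none_or]
    by_cases hmem : a ∈ pvMid t
    · have hc : ((pvMid t).contains a) = true := List.contains_iff_mem.2 hmem
      have hfind1 : List.find? (fun q => q.2.1.contains a)
          [(((ts.length : Int)), (pvMid t, cv))] = some ((ts.length : Int), (pvMid t, cv)) := by
        rw [List.find?_cons]
        simp only [hc]
      rw [if_pos hmem, hfind1]
      rfl
    · have hc : ((pvMid t).contains a) = false := by
        rw [Bool.eq_false_iff]
        intro hc
        exact hmem (List.contains_iff_mem.1 hc)
      have hfind1 : List.find? (fun q => q.2.1.contains a)
          [(((ts.length : Int)), (pvMid t, cv))] = none := by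
        rw [List.find?_cons]
        simp only [hc]
        rfl
      rw [if_neg hmem, hfind1, hnone]
      rfl

-- B's single pass computes the reference assignment and keeps the invariant dict
theorem pvBAssign_eq (ts : List (List Int)) :
    pvInvD ts (pvBAssign ts).1 ∧ (pvBAssign ts).2.1 = pvCvs ts
      ∧ (pvBAssign ts).2.2 = (pvAssign ts).2 := by
  induction ts using List.reverseRecOn with
  | nil =>
    refine ⟨?_, rfl, rfl⟩
    intro a
    simp [pvBAssign, pvAssign, PySem.Dict.get?_empty, PySem.List.enumerate]
  | append_singleton ts t ih =>
    obtain ⟨hInv, hcvs, hcnt⟩ := ih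
    have hBapp : pvBAssign (ts ++ [t]) = pvAltStep (pvBAssign ts) ((ts.length : Int), t) := by
      rw [pvBAssign, PySem.List.enumerate_append]
      simp [List.foldl_append, PySem.List.enumerate_cons, pvBAssign]
    rw [hBapp, pvAltStep.eq_def]
    dsimp only
    cases hA : (pvAssign ts).1.find? (fun q => pvAdjacent (pvMid t) q.1) with
    | none =>
      have hpairs : pvAssign (ts ++ [t])
          = ((pvAssign ts).1 ++ [(pvMid t, (pvAssign ts).2 + 1)], (pvAssign ts).2 + 1) := by
        rw [pvAssign_append, pvStep, hA]
      have hhits : (PySem.List.slice t (some 1) (some (-1))).filterMap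
          (fun a => (pvBAssign ts).1.get? a) = [] := by
        rw [List.filterMap_eq_nil_iff]
        intro a ha
        rw [pvInvD_none ts _ hInv a]
        intro m hm hmem
        have : pvAdjacent (pvMid t) ((pvAssign ts).1[m]).1 = true :=
          (pvAdjacent_iff _ _).2 ⟨a, ha, hmem⟩
        exact absurd this (by simpa using List.find?_eq_none.1 hA _ (List.getElem_mem hm))
      rw [hhits]
      have hmin : PySem.List.min2? ([] : List (Int × Int)) (·.1) (·.2) = none := rfl
      rw [hmin]
      dsimp only
      refine ⟨?_, ?_, ?_⟩
      · have := pvInvD_extend ts t ((pvBAssign ts).2.2 + 1) (pvBAssign ts).1 hInv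
          (by rw [hpairs, hcnt])
        exact this
      · rw [hcvs, hcnt,
          show pvCvs (ts ++ [t]) = pvCvs ts ++ [(pvAssign ts).2 + 1] from by rw [pvCvs, hpairs]; simp [pvCvs]]
      · rw [hcnt, hpairs]
    | some q =>
      have hpairs : pvAssign (ts ++ [t]) = ((pvAssign ts).1 ++ [(pvMid t, q.2)], (pvAssign ts).2) := by
        rw [pvAssign_append, pvStep, hA]
      have hAc := List.find?_eq_some_iff_getElem.1 hA
      obtain ⟨hp, j0, hj0, hqj0, hj0min⟩ := hAc
      obtain ⟨astar, hastar1, hastar2⟩ := (pvAdjacent_iff _ _).1 hp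
      -- the atom astar is seen no later than j0
      have hget1 : (pvBAssign ts).1.get? astar ≠ none := by
        intro hn
        exact (pvInvD_none ts _ hInv astar).1 hn j0 hj0 (by rw [hqj0]; exact hastar2)
      obtain ⟨vstar, hvstar⟩ := Option.ne_none_iff_exists'.1 hget1
      obtain ⟨mstar, hmstar, hvstar_eq, hmem_star, hmin_star⟩ := pvInvD_some ts _ hInv _ _ hvstar
      have hmstar_le : mstar ≤ j0 := by
        by_contra hgt
        exact hmin_star j0 (by omega) hj0 (by rw [hqj0]; exact hastar2)
      have hvmem : vstar ∈ (PySem.List.slice t (some 1) (some (-1))).filterMap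
          (fun a => (pvBAssign ts).1.get? a) :=
        List.mem_filterMap.2 ⟨astar, hastar1, hvstar⟩
      have hne : (PySem.List.slice t (some 1) (some (-1))).filterMap
          (fun a => (pvBAssign ts).1.get? a) ≠ [] := by
        intro hnil
        rw [hnil] at hvmem
        simp at hvmem
      obtain ⟨m, hm⟩ := Option.isSome_iff_exists.1 (pvMin2_isSome _ hne)
      obtain ⟨hm_mem, hm_min⟩ := pvMin2_spec _ _ hm
      obtain ⟨am, ham1, ham2⟩ := List.mem_filterMap.1 hm_mem
      obtain ⟨mm, hmm, hm_eq, hmem_m, _⟩ := pvInvD_some ts _ hInv _ _ ham2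
      have hmm_ge : j0 ≤ mm := by
        by_contra hlt
        have : pvAdjacent (pvMid t) ((pvAssign ts).1[mm]).1 = true :=
          (pvAdjacent_iff _ _).2 ⟨am, ham1, hmem_m⟩
        have hfalse := hj0min mm (by omega)
        rw [this] at hfalse
        simp at hfalse
      have hmm_le : mm ≤ j0 := by
        have h1 := hm_min vstar hvmem
        rw [hm_eq, hvstar_eq] at h1
        simp only at h1
        omega
      have hmm_eq : mm = j0 := by omega
      subst hmm_eq
      have hm2 : m.2 = q.2 := by
        rw [hm_eq]
        dsimp only
        rw [hqj0]
      rw [hm]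
      dsimp only
      rw [hm2]
      refine ⟨?_, ?_, ?_⟩
      · exact pvInvD_extend ts t q.2 (pvBAssign ts).1 hInv (by rw [hpairs])
      · rw [hcvs,
          show pvCvs (ts ++ [t]) = pvCvs ts ++ [q.2] from by rw [pvCvs, hpairs]; simp [pvCvs]]
      · rw [hcnt, hpairs]



theorem pvMap_range_getD {α β : Type} (l : List α) (F : α → β) (d : α) :
    (List.range l.length).map (fun j => F (l.getD j d)) = l.map F := by
  apply List.ext_getElem (by simp)
  intro i h1 h2
  simp only [List.getElem_map, List.getElem_range]
  rw [List.getD_eq_getElem _ _ (by simpa using h2)]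

-- A's conditional-comma loop, at the String level
theorem pvCondComma (L : Nat) (f : Int → String) (t0 : String) :
    ((PySem.List.pyRange 0 (L : Int)).foldl (fun text i =>
        text ++ (f i ++ if i ≠ (L : Int) - 1 then "," else "")) t0).toList
      = t0.toList ++ PySem.Chars.join [','] ((List.range L).map (fun (j : Nat) => (f (j : Int)).toList)) := by
  rw [pvToList_foldl_append, PySem.List.pyRange_zero_natCast, List.map_map]
  congr 1
  have hss : ((List.range L).map (fun (j : Nat) => (f (j : Int)).toList)).length = L := by simp
  have hjc := pvJoinComma [','] ((List.range L).map (fun (j : Nat) => (f (j : Int)).toList))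
  rw [hss] at hjc
  have hmc : ∀ j ∈ List.range L,
      ((fun i => (f i ++ if i ≠ (L : Int) - 1 then "," else "").toList) ∘ (fun k : Nat => (k : Int))) j
      = ((List.range L).map (fun (j : Nat) => (f (j : Int)).toList)).getD j []
        ++ if (j : Int) ≠ (L : Int) - 1 then [','] else [] := by
    intro j hj
    have hjL : j < L := List.mem_range.1 hj
    have hgd : ((List.range L).map (fun (j : Nat) => (f (j : Int)).toList)).getD j [] = (f (j : Int)).toList := by
      rw [List.getD_eq_getElem _ _ (by simpa using hjL)]
      simp
    rw [Function.comp_apply, String.toList_append, hgd]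
    congr 1
    split_ifs <;> rfl
  rw [List.map_congr_left hmc, hjc]

-- A's append-only loops, at the String level
theorem pvTrailFold (L : Nat) (f : Int → String) (t0 : String) :
    ((PySem.List.pyRange 0 (L : Int)).foldl (fun text i => text ++ f i) t0).toList
      = t0.toList ++ ((List.range L).map (fun (j : Nat) => (f (j : Int)).toList)).flatten := by
  rw [pvToList_foldl_append, PySem.List.pyRange_zero_natCast, List.map_map]
  rfl

-- A's per-CV torsion list is the CV's group
theorem pvTorsionList (cvs : List Int) (k : Int) :
    ((PySem.List.enumerate (cvs.map some)).filter (fun p => p.2 == some (k + 1))).map (·.1)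
      = pvGrp cvs (k + 1) := by
  rw [pvEnumerate_map, List.filter_map, List.map_map]
  have hpred : ((fun p : Int × Option Int => p.2 == some (k + 1)) ∘ (fun q : Int × Int => (q.1, some q.2)))
      = fun q : Int × Int => q.2 == k + 1 := by
    funext q
    simp
  rw [hpred]
  rfl

-- B's one-pass grouping produces exactly the per-CV groups
theorem pvBGroups_eq (cvs : List Int) (cnt : Int) (h0 : 0 ≤ cnt)
    (hb : ∀ c ∈ cvs, 1 ≤ c ∧ c ≤ cnt) :
    pvBGroups cvs cnt = (PySem.List.pyRange 0 cnt).map (fun k => pvGrp cvs (k + 1)) := by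
  have hcnt : ((cnt.toNat : Nat) : Int) = cnt := Int.toNat_of_nonneg h0
  have hinitlen : ((PySem.List.pyRange 0 cnt).map (fun _ => ([] : List Int))).length = cnt.toNat := by
    rw [List.length_map, ← hcnt, pvLength_pyRange_zero, Int.toNat_natCast]
  have hlen : (pvBGroups cvs cnt).length = cnt.toNat := by
    rw [pvBGroups, pvGroups_fold_length, hinitlen]
  have hb' : ∀ q ∈ PySem.List.enumerate cvs, 1 ≤ q.2
      ∧ q.2 ≤ (((PySem.List.pyRange 0 cnt).map (fun _ => ([] : List Int))).length : Int) := by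
    intro q hq
    obtain ⟨m, hm, rfl⟩ := (PySem.List.mem_enumerate_iff _ _ _).1 hq
    have := hb _ (List.getElem_mem hm)
    rw [hinitlen, hcnt]
    exact this
  apply List.ext_getElem?
  intro k
  by_cases hk : k < cnt.toNat
  · have hkinit : k < ((PySem.List.pyRange 0 cnt).map (fun _ => ([] : List Int))).length := by
      rw [hinitlen]; exact hk
    rw [pvBGroups, pvGroups_fold _ _ hb' k hkinit]
    have hinit : ((PySem.List.pyRange 0 cnt).map (fun _ => ([] : List Int)))[k] = [] := by
      simp
    rw [hinit]
    have hr : ((PySem.List.pyRange 0 cnt).map (fun k => pvGrp cvs (k + 1)))[k]?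
        = some (pvGrp cvs ((k : Int) + 1)) := by
      rw [List.getElem?_map]
      rw [show (PySem.List.pyRange 0 cnt)[k]? = some ((k : Int)) from ?_]
      · rfl
      · rw [← hcnt, PySem.List.pyRange_zero_natCast, List.getElem?_map,
          List.getElem?_range (by simpa using hk)]
        rfl
    rw [hr]
    rfl
  · rw [List.getElem?_eq_none (by rw [hlen]; omega),
      List.getElem?_eq_none (by rw [List.length_map, ← hcnt, pvLength_pyRange_zero]; omega)]


theorem pvStr_ext {s t : String} (h : s.toList = t.toList) : s = t := by
  have h2 := congrArg String.ofList h
  simpa [String.ofList_toList] using h2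

theorem pvALine1_eq (ts : List (List Int)) (i : Int) :
    (pvALine1 ts i).toList = (pvBLine1 (i, PySem.List.pyGetD ts i [])).toList
      ++ ("\n" : String).toList := by
  simp [pvALine1, pvBLine1, pvTemplateText, String.toList_append]

theorem pvLines1_eq (ts : List (List Int)) :
    (PySem.List.pyRange 0 (ts.length : Int)).map (fun i => (pvALine1 ts i).toList)
      = (PySem.List.enumerate ts).map (fun p => (pvBLine1 p).toList ++ ("\n" : String).toList) := by
  rw [PySem.List.enumerate_eq_map_pyRange ts [], List.map_map]
  rw [show PySem.List.len ts = (ts.length : Int) from rfl]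
  apply List.map_congr_left
  intro i hi
  rw [Function.comp_apply, pvALine1_eq]

theorem pvPhiItems (g : List Int) :
    (List.range g.length).map (fun (j : Nat) =>
        (("phi" ++ PySem.Int.toStr (PySem.List.pyGetD g ((j : Nat) : Int) 0 + 1)) : String).toList)
      = (g.map (fun i => "phi" ++ PySem.Int.toStr (i + 1))).map String.toList := by
  rw [List.map_map]
  rw [List.map_congr_left (fun j hj => by
    rw [PySem.List.pyGetD_natCast] :
    ∀ j ∈ List.range g.length,
      (("phi" ++ PySem.Int.toStr (PySem.List.pyGetD g ((j : Nat) : Int) 0 + 1)) : String).toList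
      = (("phi" ++ PySem.Int.toStr (g.getD j 0 + 1)) : String).toList)]
  exact pvMap_range_getD g (fun x => (("phi" ++ PySem.Int.toStr (x + 1)) : String).toList) 0

theorem pvSigmaItems (g : List Int) :
    (List.range g.length).map (fun (_ : Nat) => ("0.35" : String).toList)
      = (List.replicate g.length ("0.35" : String)).map String.toList := by
  rw [List.map_replicate]
  apply List.ext_getElem (by simp)
  intro i h1 h2
  simp

theorem pvALine2_eq (cvs : List Int) (k : Int) :
    (pvALine2 (cvs.map some) k).toList
      = (pvBLine2 (k + 1, pvGrp cvs (k + 1))).toList ++ ("\n" : String).toList := by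
  rw [pvALine2.eq_def]
  dsimp only
  rw [pvTorsionList]
  have hfun1 : (fun (text : String) (i_tors : Int) =>
      let text2 := text ++ "phi" ++ PySem.Int.toStr (PySem.List.pyGetD (pvGrp cvs (k + 1)) i_tors 0 + 1)
      if i_tors ≠ ((pvGrp cvs (k + 1)).length : Int) - 1 then text2 ++ "," else text2)
      = fun (text : String) (i : Int) =>
        text ++ (("phi" ++ PySem.Int.toStr (PySem.List.pyGetD (pvGrp cvs (k + 1)) i 0 + 1))
          ++ if i ≠ ((pvGrp cvs (k + 1)).length : Int) - 1 then "," else "") := by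
    funext text i
    split_ifs <;> simp [String.append_assoc]
  have hfun2 : (fun (text : String) (i_tors : Int) =>
      let text2 := text ++ "0.35"
      if i_tors ≠ ((pvGrp cvs (k + 1)).length : Int) - 1 then text2 ++ "," else text2)
      = fun (text : String) (i : Int) =>
        text ++ (("0.35" : String)
          ++ if i ≠ ((pvGrp cvs (k + 1)).length : Int) - 1 then "," else "") := by
    funext text i
    split_ifs <;> simp [String.append_assoc]
  rw [hfun1, hfun2]
  simp only [String.toList_append]
  rw [pvCondComma]
  simp only [String.toList_append]
  rw [pvCondComma]
  rw [pvPhiItems, pvSigmaItems]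
  simp [pvBLine2, pvTemplateText, String.toList_append, PySem.Str.toList_join,
    List.append_assoc, show (",") .toList = [','] from rfl]

theorem pvALine3_eq (cvs : List Int) (k : Int) :
    (pvALine3 (cvs.map some) k).toList
      = (pvBLine3 (k + 1, pvGrp cvs (k + 1))).toList ++ ("\n" : String).toList := by
  rw [pvALine3.eq_def]
  dsimp only
  rw [pvTorsionList]
  have hfun : (fun (text : String) (i_tors : Int) =>
      text ++ "phi" ++ PySem.Int.toStr (PySem.List.pyGetD (pvGrp cvs (k + 1)) i_tors 0 + 1) ++ ",")
      = fun (text : String) (i : Int) =>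
        text ++ (("phi" ++ PySem.Int.toStr (PySem.List.pyGetD (pvGrp cvs (k + 1)) i 0 + 1) ++ ",")) := by
    funext text i
    simp [String.append_assoc]
  rw [hfun]
  simp only [String.toList_append]
  rw [pvTrailFold]
  have hitems : (List.range (pvGrp cvs (k + 1)).length).map (fun (j : Nat) =>
      (("phi" ++ PySem.Int.toStr (PySem.List.pyGetD (pvGrp cvs (k + 1)) ((j : Nat) : Int) 0 + 1) ++ ",") : String).toList)
      = ((pvGrp cvs (k + 1)).map (fun i => "phi" ++ PySem.Int.toStr (i + 1) ++ ",")).map String.toList := by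
    rw [List.map_map]
    rw [List.map_congr_left (fun j hj => by
      rw [PySem.List.pyGetD_natCast] :
      ∀ j ∈ List.range (pvGrp cvs (k + 1)).length,
        (("phi" ++ PySem.Int.toStr (PySem.List.pyGetD (pvGrp cvs (k + 1)) ((j : Nat) : Int) 0 + 1) ++ ",") : String).toList
        = (("phi" ++ PySem.Int.toStr ((pvGrp cvs (k + 1)).getD j 0 + 1) ++ ",") : String).toList)]
    exact pvMap_range_getD _ (fun x => (("phi" ++ PySem.Int.toStr (x + 1) ++ ",") : String).toList) 0
  rw [hitems]
  simp [pvBLine3, pvTemplateText, String.toList_append, PySem.Str.toList_join,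
    pvJoin_nil_eq_flatten, List.append_assoc, show ("" : String).toList = [] from rfl]

theorem pvLines2_eq (cvs : List Int) (cnt : Int) (h0 : 0 ≤ cnt)
    (hb : ∀ c ∈ cvs, 1 ≤ c ∧ c ≤ cnt) :
    (PySem.List.pyRange 0 cnt).map (fun k => (pvALine2 (cvs.map some) k).toList)
      = (PySem.List.enumerate (pvBGroups cvs cnt) 1).map
          (fun q => (pvBLine2 q).toList ++ ("\n" : String).toList) := by
  rw [pvBGroups_eq cvs cnt h0 hb, pvEnumerate_map]
  rw [show cnt = ((cnt.toNat : Nat) : Int) from (Int.toNat_of_nonneg h0).symm,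
    pvEnumerate_pyRange cnt.toNat 1, List.map_map, List.map_map]
  apply List.map_congr_left
  intro k hk
  rw [Function.comp_apply]
  rw [show (1 : Int) + k = k + 1 from by ring, pvALine2_eq]
  rfl

theorem pvLines3_eq (cvs : List Int) (cnt : Int) (h0 : 0 ≤ cnt)
    (hb : ∀ c ∈ cvs, 1 ≤ c ∧ c ≤ cnt) :
    (PySem.List.pyRange 0 cnt).map (fun k => (pvALine3 (cvs.map some) k).toList)
      = (PySem.List.enumerate (pvBGroups cvs cnt) 1).map
          (fun q => (pvBLine3 q).toList ++ ("\n" : String).toList) := by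
  rw [pvBGroups_eq cvs cnt h0 hb, pvEnumerate_map]
  rw [show cnt = ((cnt.toNat : Nat) : Int) from (Int.toNat_of_nonneg h0).symm,
    pvEnumerate_pyRange cnt.toNat 1, List.map_map, List.map_map]
  apply List.map_congr_left
  intro k hk
  rw [Function.comp_apply]
  rw [show (1 : Int) + k = k + 1 from by ring, pvALine3_eq]
  rfl

-- ===== VERDICT (by name: the statement is the Claim_ definition above) =====
theorem write_plumed_script_spec : Claim_equal_write_plumed_script := by
  intro ts hdom hpre
  unfold Spec_write_plumed_script
  obtain ⟨hInv, hcvs, hcnt⟩ := pvBAssign_eq ts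
  obtain ⟨hnn, hbd⟩ := pvAssign_bounds ts
  have hb : ∀ c ∈ pvCvs ts, 1 ≤ c ∧ c ≤ (pvAssign ts).2 := by
    intro c hc
    obtain ⟨q, hq, rfl⟩ := List.mem_map.1 hc
    exact hbd q hq
  apply pvStr_ext
  rw [write_plumed_script.eq_def, write_plumed_script_alt.eq_def]
  dsimp only
  rw [pvAAssign_eq ts hpre, hcvs, hcnt]
  dsimp only
  simp only [pvToList_foldl_append, String.toList_append]
  rw [PySem.Str.toList_join, pvJoin_sep_flatten _ _ (by simp)]
  simp only [List.map_append, List.map_map, List.flatten_append, Function.comp_def]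
  rw [← pvLines1_eq ts, ← pvLines2_eq (pvCvs ts) (pvAssign ts).2 hnn hb,
    ← pvLines3_eq (pvCvs ts) (pvAssign ts).2 hnn hb]
  simp [List.append_assoc, show ("" : String).toList = [] from rfl]

def write_plumed_script_raises : Claim_raises_write_plumed_script := by
  unfold Claim_raises_write_plumed_script
  exact ⟨fun ts _ h hp => hp h, by decide⟩
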